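-- pv_equiv track=rewrite | github.com/mikimaine/nlp_hw | a.py | build_model_for_generation
-- ===== SOURCE A (Python) =====
-- def build_model_for_generation(ngram_counts, n):
--     """
--     Transform raw n-gram counts into a model suitable for text generation.
--
--     Args:
--         ngram_counts (dict): Dictionary of n-gram counts
--         n (int): Size of n-gram
--
--     Returns:
--         dict: A dictionary mapping (n-1)-gram prefixes to possible next tokens with counts
--     """
--     model = {}
--     for ngram, count in ngram_counts.items():
--         prefix = ngram[:-1]
--         next_tok = ngram[-1]
--         if prefix not in model:
--             model[prefix] = {}
--         model[prefix][next_tok] = model[prefix].get(next_tok, 0) + count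
--     return model
-- ===== SOURCE B (Python) =====
-- def build_model_for_generation(ngram_counts, n):
--     """Two-pass decomposition: collect distinct prefixes in first-occurrence
--     order, then build each inner dict with one comprehension per prefix."""
--     prefixes = list(dict.fromkeys(ngram[:-1] for ngram in ngram_counts))
--     return {p: {ngram[-1]: count for ngram, count in ngram_counts.items()
--                 if ngram[:-1] == p}
--             for p in prefixes}
-- ===== Notes on version B (the rewrite author's own statement) =====
-- stated objective: alternative
-- what changed: A builds the nested dict in one pass with membership tests and in-place updates; B first collects the distinct prefixes in first-occurrence order and then builds each inner dict with one filtering comprehension per prefix.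
import Mathlib
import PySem

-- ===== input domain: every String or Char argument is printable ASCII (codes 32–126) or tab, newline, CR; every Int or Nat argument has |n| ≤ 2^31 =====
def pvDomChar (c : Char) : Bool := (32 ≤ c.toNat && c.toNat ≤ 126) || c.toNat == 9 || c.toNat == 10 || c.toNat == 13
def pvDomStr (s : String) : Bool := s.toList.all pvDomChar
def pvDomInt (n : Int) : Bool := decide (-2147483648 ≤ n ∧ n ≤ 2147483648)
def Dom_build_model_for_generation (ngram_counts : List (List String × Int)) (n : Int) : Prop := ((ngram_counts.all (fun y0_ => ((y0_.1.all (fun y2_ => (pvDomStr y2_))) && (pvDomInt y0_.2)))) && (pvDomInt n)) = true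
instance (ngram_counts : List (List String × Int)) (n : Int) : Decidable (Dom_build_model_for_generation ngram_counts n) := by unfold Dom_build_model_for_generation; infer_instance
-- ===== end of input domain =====

-- B replaces A's single pass with membership-tested in-place updates by a two-pass
-- decomposition (ordered distinct prefixes, then one filtering comprehension per prefix).

-- ===== PORT A =====
-- loop body of A (one item of ngram_counts.items())
def pvStepA (model : PySem.Dict (List String) (PySem.Dict String Int)) (pc : List String × Int) :
    PySem.Dict (List String) (PySem.Dict String Int) :=
  let pfx := PySem.List.slice pc.1 none (some (-1))      -- ngram[:-1]
  match PySem.List.pyGet? pc.1 (-1) with                 -- ngram[-1]; none = IndexError (excluded by Pre_)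
  | none => model
  | some next_tok =>
    let model := if model.contains pfx then model else model.insert pfx PySem.Dict.empty
    let inner := model.getD pfx PySem.Dict.empty
    model.insert pfx (inner.insert next_tok (inner.getD next_tok 0 + pc.2))

def build_model_for_generation (ngram_counts : List (List String × Int)) (n : Int) : List (List String × List (String × Int)) :=
  let model := ngram_counts.foldl pvStepA PySem.Dict.empty
  model.items.map (fun kv => (kv.1, kv.2.items))

-- ===== PORT B =====
def build_model_for_generation_alt (ngram_counts : List (List String × Int)) (n : Int) : List (List String × List (String × Int)) :=
  let prefixes := PySem.List.dedup (ngram_counts.map (fun pc => PySem.List.slice pc.1 none (some (-1))))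
  prefixes.map (fun p =>
    (p, ngram_counts.filterMap (fun pc =>
          if PySem.List.slice pc.1 none (some (-1)) = p then
            (PySem.List.pyGet? pc.1 (-1)).map (fun t => (t, pc.2))   -- ngram[-1]; under Pre_ always some
          else none)))

-- ===== PRECONDITION & SPEC =====
-- Pre_ excludes (a) inputs containing an empty ngram, on which A raises IndexError (ngram[-1]),
-- and (b) association lists with duplicate ngram keys, which do not represent a Python dict
-- (A's parameter is a dict, so such inputs never arise).
def Pre_build_model_for_generation (ngram_counts : List (List String × Int)) (n : Int) : Prop :=
  (∀ pc ∈ ngram_counts, pc.1 ≠ []) ∧ (ngram_counts.map Prod.fst).Nodup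
instance (ngram_counts : List (List String × Int)) (n : Int) : Decidable (Pre_build_model_for_generation ngram_counts n) := by unfold Pre_build_model_for_generation; infer_instance
def pvWitness_build_model_for_generation : (List (List String × Int)) × Int :=
  ([(["a","b"], 2), (["a","c"], 1), (["b","b"], 3)], 2)

def Spec_build_model_for_generation (ngram_counts : List (List String × Int)) (n : Int) (out : List (List String × List (String × Int))) : Prop := out = build_model_for_generation_alt ngram_counts n
instance (ngram_counts : List (List String × Int)) (n : Int) (out : List (List String × List (String × Int))) : Decidable (Spec_build_model_for_generation ngram_counts n out) := by unfold Spec_build_model_for_generation; infer_instance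

-- ===== CLAIM (what is proved, stated in full; the proofs are below) =====
def Claim_equal_build_model_for_generation : Prop := ∀ (ngram_counts : List (List String × Int)) (n : Int), Dom_build_model_for_generation ngram_counts n → Pre_build_model_for_generation ngram_counts n → Spec_build_model_for_generation ngram_counts n (build_model_for_generation ngram_counts n)

-- ===== LEMMAS AND PROOFS =====

-- the prefix key of an entry (what both ports compute as ngram[:-1])
def pvKey (pc : List String × Int) : List String := PySem.List.slice pc.1 none (some (-1))

-- B's inner group for a prefix p
def pvGrp (p : List String) (l : List (List String × Int)) : List (String × Int) :=
  l.filterMap (fun pc =>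
    if PySem.List.slice pc.1 none (some (-1)) = p then
      (PySem.List.pyGet? pc.1 (-1)).map (fun t => (t, pc.2))
    else none)

-- the grouped model B describes, as a Dict
def pvModel (l : List (List String × Int)) : PySem.Dict (List String) (PySem.Dict String Int) :=
  PySem.Dict.mk ((PySem.List.dedup (l.map pvKey)).map (fun p => (p, PySem.Dict.mk (pvGrp p l))))

theorem pvGrp_append (p : List String) (l : List (List String × Int)) (x : List String × Int) :
    pvGrp p (l ++ [x]) = pvGrp p l ++ pvGrp p [x] := by
  simp [pvGrp]

theorem pvGrp_nil_of_not_mem (p : List String) (l : List (List String × Int))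
    (h : p ∉ l.map pvKey) : pvGrp p l = [] := by
  induction l with
  | nil => rfl
  | cons a t ih =>
    simp only [List.map_cons, List.mem_cons, not_or] at h
    simp only [pvGrp, List.filterMap_cons]
    have : ¬ (PySem.List.slice a.1 none (some (-1)) = p) := fun hc => h.1 (by simp [pvKey, hc])
    simp only [if_neg this]
    exact ih h.2

-- an entry of pvGrp p l certifies that p ++ [t] is an ngram of l
theorem pvGrp_key_mem (p : List String) (l : List (List String × Int)) (t : String) (c : Int)
    (hne : ∀ pc ∈ l, pc.1 ≠ []) (h : (t, c) ∈ pvGrp p l) : p ++ [t] ∈ l.map Prod.fst := by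
  simp only [pvGrp, List.mem_filterMap] at h
  obtain ⟨pc, hpc, heq⟩ := h
  by_cases hif : PySem.List.slice pc.1 none (some (-1)) = p
  · rw [if_pos hif, PySem.List.pyGet?_neg_one] at heq
    have hpcne : pc.1 ≠ [] := hne pc hpc
    rw [List.getLast?_eq_some_getLast hpcne] at heq
    simp only [Option.map_some, Option.some_inj, Prod.mk.injEq] at heq
    have h1 : pc.1.dropLast = p := by rw [← hif, PySem.List.slice_to_neg_one]
    have h3 : p ++ [t] = pc.1 := by
      rw [← h1, ← heq.1]
      exact List.dropLast_concat_getLast hpcne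
    rw [h3]
    exact List.mem_map_of_mem hpc
  · rw [if_neg hif] at heq; cases heq

-- lookup in the model built as a map over distinct prefixes
theorem pv_get?_model (ps : List (List String)) (f : List String → PySem.Dict String Int)
    (q : List String) :
    (PySem.Dict.mk (ps.map (fun p => (p, f p)))).get? q =
      if q ∈ ps then some (f q) else none := by
  induction ps with
  | nil => simp [PySem.Dict.get?]
  | cons a t ih =>
    simp only [List.map_cons, PySem.Dict.get?_mk_cons, ih, List.mem_cons]
    by_cases h : a = q
    · subst h; simp
    · have hqa : ¬ q = a := fun hq => h hq.symm
      have hb : (a == q) = false := by simp [h]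
      simp [hb, hqa]

-- insert at a key already present rewrites that entry in place
theorem pv_insert_mem (ps : List (List String)) (f : List String → PySem.Dict String Int)
    (q : List String) (v : PySem.Dict String Int) (hq : q ∈ ps) :
    (PySem.Dict.mk (ps.map (fun p => (p, f p)))).insert q v =
      PySem.Dict.mk (ps.map (fun p => (p, if p = q then v else f p))) := by
  have hc : (PySem.Dict.mk (ps.map (fun p => (p, f p)))).contains q = true := by
    rw [PySem.Dict.contains_eq_isSome_get?, pv_get?_model ps f q, if_pos hq]
    rfl
  apply PySem.Dict.ext
  rw [PySem.Dict.items_insert_of_contains _ _ hc]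
  show (ps.map (fun p => (p, f p))).map _ = _
  rw [List.map_map]
  apply List.map_congr_left
  intro a _
  by_cases h : a = q
  · subst h; simp
  · have hb : (a == q) = false := by simp [h]
    simp [hb, h]

-- python dedup appends a fresh element at the end
theorem pv_dedup_append (xs : List (List String)) (y : List String) :
    PySem.List.dedup (xs ++ [y]) =
      if y ∈ PySem.List.dedup xs then PySem.List.dedup xs else PySem.List.dedup xs ++ [y] := by
  simp only [PySem.List.dedup_eq_ofList, PySem.Set.ofList_eq_foldl, List.foldl_append,
    List.foldl_cons, List.foldl_nil]
  show PySem.Set.add _ y = _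
  simp [PySem.Set.add, PySem.Set.contains]

-- an inner dict built from a group has exactly the group's tokens as keys
theorem pv_inner_getD_zero (g : List (String × Int)) (t : String)
    (h : t ∉ g.map Prod.fst) : (PySem.Dict.mk g).getD t 0 = 0 := by
  induction g with
  | nil => rfl
  | cons a r ih =>
    simp only [List.map_cons, List.mem_cons, not_or] at h
    have hb : (a.1 == t) = false := by rw [beq_eq_false_iff_ne]; exact Ne.symm h.1
    rw [PySem.Dict.getD_eq_get?_getD, PySem.Dict.get?_mk_cons, if_neg (by simp [hb]),
      ← PySem.Dict.getD_eq_get?_getD]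
    exact ih h.2

theorem pv_inner_insert_fresh (g : List (String × Int)) (t : String) (v : Int)
    (h : t ∉ g.map Prod.fst) :
    (PySem.Dict.mk g).insert t v = PySem.Dict.mk (g ++ [(t, v)]) := by
  have hc : (PySem.Dict.mk g).contains t = false := by
    induction g with
    | nil => rfl
    | cons a r ih =>
      simp only [List.map_cons, List.mem_cons, not_or] at h
      have hb : (a.1 == t) = false := by rw [beq_eq_false_iff_ne]; exact Ne.symm h.1
      rw [PySem.Dict.contains_eq_isSome_get?, PySem.Dict.get?_mk_cons, if_neg (by simp [hb]),
        ← PySem.Dict.contains_eq_isSome_get?]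
      exact ih h.2
  apply PySem.Dict.ext
  rw [PySem.Dict.items_insert_of_not_contains _ _ hc]

-- the heart: A's left fold over l produces exactly B's grouped model
theorem pv_fold_eq_model (l : List (List String × Int))
    (hne : ∀ pc ∈ l, pc.1 ≠ []) (hnd : (l.map Prod.fst).Nodup) :
    l.foldl pvStepA PySem.Dict.empty = pvModel l := by
  induction l using List.reverseRecOn with
  | nil => rfl
  | append_singleton l x ih =>
    have hne' : ∀ pc ∈ l, pc.1 ≠ [] := fun pc h => hne pc (by simp [h])
    have hnd' : (l.map Prod.fst).Nodup := by
      rw [List.map_append] at hnd; exact (List.nodup_append.mp hnd).1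
    have hxne : x.1 ≠ [] := hne x (by simp)
    have hxfst : x.1 ∉ l.map Prod.fst := by
      rw [List.map_append] at hnd
      have hdisj := List.disjoint_of_nodup_append hnd
      intro hmemx
      exact hdisj hmemx (by simp)
    obtain ⟨t, ht⟩ : ∃ t, PySem.List.pyGet? x.1 (-1) = some t := by
      rw [PySem.List.pyGet?_neg_one, List.getLast?_eq_some_getLast hxne]
      exact ⟨_, rfl⟩
    have hxdec : pvKey x ++ [t] = x.1 := by
      have ht' := ht
      rw [PySem.List.pyGet?_neg_one, List.getLast?_eq_some_getLast hxne, Option.some_inj] at ht'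
      rw [pvKey, PySem.List.slice_to_neg_one, ← ht']
      exact List.dropLast_concat_getLast hxne
    rw [List.foldl_append, List.foldl_cons, List.foldl_nil, ih hne' hnd']
    show pvStepA (pvModel l) x = pvModel (l ++ [x])
    have hgrp_single : ∀ p, pvGrp p [x] = if pvKey x = p then [(t, x.2)] else [] := by
      intro p
      simp only [pvGrp, List.filterMap_cons, List.filterMap_nil, ht, pvKey]
      split_ifs <;> simp
    set ps := PySem.List.dedup (l.map pvKey) with hps
    have hcon : (pvModel l).contains (pvKey x) = decide (pvKey x ∈ ps) := by
      rw [pvModel, PySem.Dict.contains_eq_isSome_get?, pv_get?_model]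
      by_cases h : pvKey x ∈ ps
      · rw [if_pos h, decide_eq_true h]; rfl
      · rw [if_neg h, decide_eq_false h]; rfl
    by_cases hmem : pvKey x ∈ ps
    · -- prefix already present: in-place update of the inner dict
      have hfresh : t ∉ (pvGrp (pvKey x) l).map Prod.fst := by
        intro hmemt
        obtain ⟨⟨t', c⟩, hg, het⟩ := List.mem_map.mp hmemt
        subst het
        exact hxfst (hxdec ▸ pvGrp_key_mem _ _ _ _ hne' hg)
      have hg0 : (PySem.Dict.mk (pvGrp (pvKey x) l)).getD t 0 = 0 := pv_inner_getD_zero _ _ hfresh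
      simp only [pvStepA, ht]
      rw [show PySem.List.slice x.1 none (some (-1)) = pvKey x from rfl]
      rw [hcon, if_pos (decide_eq_true hmem)]
      rw [pvModel, PySem.Dict.getD_eq_get?_getD, pv_get?_model, if_pos hmem]
      simp only [Option.getD_some]
      rw [hg0, pv_inner_insert_fresh _ _ _ hfresh, pv_insert_mem _ _ _ _ hmem]
      rw [pvModel, List.map_append, List.map_cons, List.map_nil, pv_dedup_append, ← hps,
        if_pos hmem]
      apply PySem.Dict.ext
      show List.map _ ps = List.map _ ps
      apply List.map_congr_left
      intro p _
      by_cases h : p = pvKey x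
      · subst h
        rw [if_pos rfl, pvGrp_append, hgrp_single, if_pos rfl]
        simp
      · rw [if_neg h, pvGrp_append, hgrp_single, if_neg (fun he => h he.symm), List.append_nil]
    · -- fresh prefix: a new inner dict is appended at the end
      have hnotl : pvKey x ∉ l.map pvKey := fun h => hmem (by
        rw [hps]
        simpa [PySem.List.mem_dedup] using h)
      have hgnil : pvGrp (pvKey x) l = [] := pvGrp_nil_of_not_mem _ _ hnotl
      have hfreshps : pvKey x ∉ ps := hmem
      simp only [pvStepA, ht]
      rw [show PySem.List.slice x.1 none (some (-1)) = pvKey x from rfl]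
      rw [hcon, if_neg (fun hc => hmem (of_decide_eq_true hc))]
      -- the insert of the empty inner dict appends (key not present)
      have hnc : (pvModel l).contains (pvKey x) = false := by rw [hcon]; simp [hmem]
      have happ : (pvModel l).insert (pvKey x) PySem.Dict.empty =
          PySem.Dict.mk ((ps ++ [pvKey x]).map
            (fun p => (p, if p = pvKey x then PySem.Dict.empty else PySem.Dict.mk (pvGrp p l)))) := by
        apply PySem.Dict.ext
        rw [PySem.Dict.items_insert_of_not_contains _ _ hnc]
        show List.map _ ps ++ _ = List.map _ (ps ++ [pvKey x])
        rw [List.map_append]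
        congr 1
        · apply List.map_congr_left
          intro p hp
          rw [if_neg (fun he => hfreshps (by rw [← he]; exact hp))]
        · simp
      rw [happ]
      have hmem' : pvKey x ∈ ps ++ [pvKey x] := by simp
      rw [PySem.Dict.getD_eq_get?_getD, pv_get?_model, if_pos hmem', if_pos rfl]
      simp only [Option.getD_some, PySem.Dict.getD_empty]
      have : (PySem.Dict.empty : PySem.Dict String Int).insert t (0 + x.2) =
          PySem.Dict.mk [(t, 0 + x.2)] := rfl
      rw [this, pv_insert_mem _ _ _ _ hmem']
      have hded : PySem.List.dedup (List.map pvKey (l ++ [x])) = ps ++ [pvKey x] := by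
        rw [List.map_append, List.map_cons, List.map_nil, pv_dedup_append, ← hps, if_neg hmem]
      rw [pvModel, hded]
      apply PySem.Dict.ext
      show List.map _ (ps ++ [pvKey x]) = List.map _ (ps ++ [pvKey x])
      apply List.map_congr_left
      intro p hp
      by_cases h : p = pvKey x
      · subst h
        rw [if_pos rfl, pvGrp_append, hgnil, hgrp_single, if_pos rfl]
        simp
      · rw [if_neg h, if_neg h, pvGrp_append, hgrp_single, if_neg (fun he => h he.symm),
          List.append_nil]

-- ===== VERDICT (by name: the statement is the Claim_ definition above) =====
theorem build_model_for_generation_spec : Claim_equal_build_model_for_generation := by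
  intro ngram_counts n _ hpre
  show _ = _
  unfold build_model_for_generation build_model_for_generation_alt
  rw [show (fun pc : List String × Int => PySem.List.slice pc.1 none (some (-1))) = pvKey from rfl,
    pv_fold_eq_model ngram_counts hpre.1 hpre.2, pvModel]
  rw [List.map_map]
  apply List.map_congr_left
  intro p _
  rfl
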